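-- pv_equiv track=rewrite | github.com/MateuszLecznar/Delivery_project | Delivery_code/calculate_award.py | calculate_award_time
-- ===== SOURCE A (Python) =====
-- def calculate_award_time(time_):
--     """
--
--     :param time_: tablica elementów (skąd, dokąd, jaki czas)
--     :return: Końcowa nagroda za przejazd
--     """
--     sum_award = 0
--     for i in time_:
--         # i[2]- czas przejazdu
--         award = 0
--         if i[2] < 5:
--             award = 40
--         if i[2] < 8 and i[2] >= 5:
--             award = 35
--         if i[2] < 10 and i[2] >= 8:
--             award = 30
--         if i[2] < 15 and i[2] >= 10:
--             award = 25
--         if i[2] < 20 and i[2] >= 15: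
--             award = 20
--         if i[2] < 25 and i[2] >= 20:
--             award = 15
--         if i[2] < 30 and i[2] >= 25:
--             award = 10
--         if i[2] < 40 and i[2] >= 30:
--             award = 5
--
--         sum_award += award
--
--     return sum_award
-- ===== SOURCE B (Python) =====
-- import bisect
--
-- _THRESHOLDS = [5, 8, 10, 15, 20, 25, 30, 40]
-- _AWARDS = [40, 35, 30, 25, 20, 15, 10, 5]
--
--
-- def calculate_award_time(time_):
--     total = 0
--     for i in time_:
--         idx = bisect.bisect_right(_THRESHOLDS, i[2])
--         if idx < 8:
--             total += _AWARDS[idx]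
--     return total
-- ===== Notes on version B (the rewrite author's own statement) =====
-- stated objective: idiomatic
-- what changed: Replaces the eight sequential if-branch comparisons per element with a binary search (bisect.bisect_right) over a sorted threshold table paired with an award table.
import Mathlib
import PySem

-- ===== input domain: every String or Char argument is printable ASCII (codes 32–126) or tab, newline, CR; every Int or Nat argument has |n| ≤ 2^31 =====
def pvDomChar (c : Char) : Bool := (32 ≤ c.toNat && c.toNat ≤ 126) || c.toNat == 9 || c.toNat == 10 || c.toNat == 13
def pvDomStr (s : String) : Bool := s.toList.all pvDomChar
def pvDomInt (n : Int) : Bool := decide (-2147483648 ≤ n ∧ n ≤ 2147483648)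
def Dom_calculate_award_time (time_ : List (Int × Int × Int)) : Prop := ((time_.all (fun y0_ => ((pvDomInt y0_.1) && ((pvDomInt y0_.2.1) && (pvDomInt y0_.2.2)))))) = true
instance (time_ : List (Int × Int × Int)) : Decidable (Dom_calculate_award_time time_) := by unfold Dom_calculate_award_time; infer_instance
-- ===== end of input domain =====

-- B replaces A's eight-branch comparison chain by a sorted threshold table queried
-- with bisect_right (idiomatic; same O(n) cost overall).

-- ===== PORT A =====
def calculate_award_time (time_ : List (Int × Int × Int)) : Int :=
  time_.foldl
    (fun sum_award i =>
      let award : Int := 0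
      let award := if i.2.2 < 5 then (40 : Int) else award
      let award := if i.2.2 < 8 ∧ i.2.2 ≥ 5 then (35 : Int) else award
      let award := if i.2.2 < 10 ∧ i.2.2 ≥ 8 then (30 : Int) else award
      let award := if i.2.2 < 15 ∧ i.2.2 ≥ 10 then (25 : Int) else award
      let award := if i.2.2 < 20 ∧ i.2.2 ≥ 15 then (20 : Int) else award
      let award := if i.2.2 < 25 ∧ i.2.2 ≥ 20 then (15 : Int) else award
      let award := if i.2.2 < 30 ∧ i.2.2 ≥ 25 then (10 : Int) else award
      let award := if i.2.2 < 40 ∧ i.2.2 ≥ 30 then (5 : Int) else award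
      sum_award + award)
    0

-- ===== PORT B =====
def pvThresholds : List Int := [5, 8, 10, 15, 20, 25, 30, 40]
def pvAwards : List Int := [40, 35, 30, 25, 20, 15, 10, 5]

-- port of the library call bisect.bisect_right on a sorted list:
-- the insertion point = number of elements ≤ x
def pvBisectRight (l : List Int) (x : Int) : Nat :=
  l.countP (fun y => decide (y ≤ x))

def calculate_award_time_alt (time_ : List (Int × Int × Int)) : Int :=
  time_.foldl
    (fun total i =>
      let idx := pvBisectRight pvThresholds i.2.2
      if idx < 8 then total + pvAwards.getD idx 0 else total)
    0

-- ===== PRECONDITION & SPEC =====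
def Spec_calculate_award_time (time_ : List (Int × Int × Int)) (out : Int) : Prop := out = calculate_award_time_alt time_
instance (time_ : List (Int × Int × Int)) (out : Int) : Decidable (Spec_calculate_award_time time_ out) := by unfold Spec_calculate_award_time; infer_instance

-- ===== CLAIM (what is proved, stated in full; the proofs are below) =====
def Claim_equal_calculate_award_time : Prop := ∀ (time_ : List (Int × Int × Int)), Dom_calculate_award_time time_ → Spec_calculate_award_time time_ (calculate_award_time time_)

-- ===== LEMMAS AND PROOFS =====

set_option maxHeartbeats 1600000

lemma pvBisectRight_eval (t : Int) :
    pvBisectRight pvThresholds t =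
      (if t < 5 then 0 else if t < 8 then 1 else if t < 10 then 2 else if t < 15 then 3
       else if t < 20 then 4 else if t < 25 then 5 else if t < 30 then 6 else if t < 40 then 7
       else 8) := by
  simp only [pvBisectRight, pvThresholds, List.countP_cons, List.countP_nil, decide_eq_true_eq]
  rcases lt_or_ge t 5 with h | h0
  · simp only [show ¬((5 : Int) ≤ t) by omega, show ¬((8 : Int) ≤ t) by omega, show ¬((10 : Int) ≤ t) by omega, show ¬((15 : Int) ≤ t) by omega, show ¬((20 : Int) ≤ t) by omega, show ¬((25 : Int) ≤ t) by omega, show ¬((30 : Int) ≤ t) by omega, show ¬((40 : Int) ≤ t) by omega, ite_true, ite_false]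
    split_ifs <;> omega
  rcases lt_or_ge t 8 with h | h1
  · simp only [show (5 : Int) ≤ t by omega, show ¬((8 : Int) ≤ t) by omega, show ¬((10 : Int) ≤ t) by omega, show ¬((15 : Int) ≤ t) by omega, show ¬((20 : Int) ≤ t) by omega, show ¬((25 : Int) ≤ t) by omega, show ¬((30 : Int) ≤ t) by omega, show ¬((40 : Int) ≤ t) by omega, ite_true, ite_false]
    split_ifs <;> omega
  rcases lt_or_ge t 10 with h | h2
  · simp only [show (5 : Int) ≤ t by omega, show (8 : Int) ≤ t by omega, show ¬((10 : Int) ≤ t) by omega, show ¬((15 : Int) ≤ t) by omega, show ¬((20 : Int) ≤ t) by omega, show ¬((25 : Int) ≤ t) by omega, show ¬((30 : Int) ≤ t) by omega, show ¬((40 : Int) ≤ t) by omega, ite_true, ite_false]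
    split_ifs <;> omega
  rcases lt_or_ge t 15 with h | h3
  · simp only [show (5 : Int) ≤ t by omega, show (8 : Int) ≤ t by omega, show (10 : Int) ≤ t by omega, show ¬((15 : Int) ≤ t) by omega, show ¬((20 : Int) ≤ t) by omega, show ¬((25 : Int) ≤ t) by omega, show ¬((30 : Int) ≤ t) by omega, show ¬((40 : Int) ≤ t) by omega, ite_true, ite_false]
    split_ifs <;> omega
  rcases lt_or_ge t 20 with h | h4
  · simp only [show (5 : Int) ≤ t by omega, show (8 : Int) ≤ t by omega, show (10 : Int) ≤ t by omega, show (15 : Int) ≤ t by omega, show ¬((20 : Int) ≤ t) by omega, show ¬((25 : Int) ≤ t) by omega, show ¬((30 : Int) ≤ t) by omega, show ¬((40 : Int) ≤ t) by omega, ite_true, ite_false]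
    split_ifs <;> omega
  rcases lt_or_ge t 25 with h | h5
  · simp only [show (5 : Int) ≤ t by omega, show (8 : Int) ≤ t by omega, show (10 : Int) ≤ t by omega, show (15 : Int) ≤ t by omega, show (20 : Int) ≤ t by omega, show ¬((25 : Int) ≤ t) by omega, show ¬((30 : Int) ≤ t) by omega, show ¬((40 : Int) ≤ t) by omega, ite_true, ite_false]
    split_ifs <;> omega
  rcases lt_or_ge t 30 with h | h6
  · simp only [show (5 : Int) ≤ t by omega, show (8 : Int) ≤ t by omega, show (10 : Int) ≤ t by omega, show (15 : Int) ≤ t by omega, show (20 : Int) ≤ t by omega, show (25 : Int) ≤ t by omega, show ¬((30 : Int) ≤ t) by omega, show ¬((40 : Int) ≤ t) by omega, ite_true, ite_false]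
    split_ifs <;> omega
  rcases lt_or_ge t 40 with h | h7
  · simp only [show (5 : Int) ≤ t by omega, show (8 : Int) ≤ t by omega, show (10 : Int) ≤ t by omega, show (15 : Int) ≤ t by omega, show (20 : Int) ≤ t by omega, show (25 : Int) ≤ t by omega, show (30 : Int) ≤ t by omega, show ¬((40 : Int) ≤ t) by omega, ite_true, ite_false]
    split_ifs <;> omega
  simp only [show (5 : Int) ≤ t by omega, show (8 : Int) ≤ t by omega, show (10 : Int) ≤ t by omega, show (15 : Int) ≤ t by omega, show (20 : Int) ≤ t by omega, show (25 : Int) ≤ t by omega, show (30 : Int) ≤ t by omega, show (40 : Int) ≤ t by omega, ite_true, ite_false]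
  split_ifs <;> omega

lemma step_eq (s : Int) (t : Int) :
    (let award : Int := 0
     let award := if t < 5 then (40 : Int) else award
     let award := if t < 8 ∧ t ≥ 5 then (35 : Int) else award
     let award := if t < 10 ∧ t ≥ 8 then (30 : Int) else award
     let award := if t < 15 ∧ t ≥ 10 then (25 : Int) else award
     let award := if t < 20 ∧ t ≥ 15 then (20 : Int) else award
     let award := if t < 25 ∧ t ≥ 20 then (15 : Int) else award
     let award := if t < 30 ∧ t ≥ 25 then (10 : Int) else award
     let award := if t < 40 ∧ t ≥ 30 then (5 : Int) else award
     s + award) =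
    (let idx := pvBisectRight pvThresholds t
     if idx < 8 then s + pvAwards.getD idx 0 else s) := by
  rcases lt_or_ge t 5 with h | h0
  · have hidx : pvBisectRight pvThresholds t = 0 := by
      rw [pvBisectRight_eval]; split_ifs <;> omega
    simp only [hidx, pvAwards]
    norm_num
    split_ifs <;> omega
  rcases lt_or_ge t 8 with h | h1
  · have hidx : pvBisectRight pvThresholds t = 1 := by
      rw [pvBisectRight_eval]; split_ifs <;> omega
    simp only [hidx, pvAwards]
    norm_num
    split_ifs <;> omega
  rcases lt_or_ge t 10 with h | h2
  · have hidx : pvBisectRight pvThresholds t = 2 := by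
      rw [pvBisectRight_eval]; split_ifs <;> omega
    simp only [hidx, pvAwards]
    norm_num
    split_ifs <;> omega
  rcases lt_or_ge t 15 with h | h3
  · have hidx : pvBisectRight pvThresholds t = 3 := by
      rw [pvBisectRight_eval]; split_ifs <;> omega
    simp only [hidx, pvAwards]
    norm_num
    split_ifs <;> omega
  rcases lt_or_ge t 20 with h | h4
  · have hidx : pvBisectRight pvThresholds t = 4 := by
      rw [pvBisectRight_eval]; split_ifs <;> omega
    simp only [hidx, pvAwards]
    norm_num
    split_ifs <;> omega
  rcases lt_or_ge t 25 with h | h5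
  · have hidx : pvBisectRight pvThresholds t = 5 := by
      rw [pvBisectRight_eval]; split_ifs <;> omega
    simp only [hidx, pvAwards]
    norm_num
    split_ifs <;> omega
  rcases lt_or_ge t 30 with h | h6
  · have hidx : pvBisectRight pvThresholds t = 6 := by
      rw [pvBisectRight_eval]; split_ifs <;> omega
    simp only [hidx, pvAwards]
    norm_num
    split_ifs <;> omega
  rcases lt_or_ge t 40 with h | h7
  · have hidx : pvBisectRight pvThresholds t = 7 := by
      rw [pvBisectRight_eval]; split_ifs <;> omega
    simp only [hidx, pvAwards]
    norm_num
    split_ifs <;> omega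
  have hidx : pvBisectRight pvThresholds t = 8 := by
    rw [pvBisectRight_eval]; split_ifs <;> omega
  simp only [hidx, pvAwards]
  norm_num
  split_ifs <;> omega

-- ===== VERDICT (by name: the statement is the Claim_ definition above) =====
theorem calculate_award_time_spec : Claim_equal_calculate_award_time := by
  intro time_ _
  unfold Spec_calculate_award_time calculate_award_time calculate_award_time_alt
  apply PySem.List.foldl_congr_mem
  intro acc x _
  exact step_eq acc x.2.2
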